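-- pv_equiv track=rewrite | github.com/KuahJiaChen/Algorithms-and-Data-Structures | Encoder (Huffman, Eias, BWT).py | elias
-- ===== SOURCE A (Python) =====
-- def elias(input_num):
--     """
--     Description: get the elias code word for the input_num
--     Written by: Kuah Jia Chen
--     Input: input_num is an integer
--     Return: the elias code word for the input_num
--     Time complexity (Worst case) : O(log N), where N is the input_num
--     Space complexity:
--         Input: O(1)
--         Aux: O(log N), where N is the input_num
--     """
--
--     # get the bit representation of the input_num
--     input_num_bit = bit_representation(input_num)
--
--     length_of_bits = len(input_num_bit)
--
--     ans = []
--
--     # use the elias formula to get the bits that encode the length of input_num_bit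
--     while length_of_bits > 1:
--
--         current_length = length_of_bits - 1
--         current_length_bits = bit_representation(current_length)
--         current_length_bits[0] = '0'
--
--         for i in range(len(current_length_bits) - 1, -1, -1):
--             ans.append(current_length_bits[i])
--
--         length_of_bits = len(current_length_bits)
--
--     # reverse the whole list since they are now in reverse order
--     ans = ans[::-1]
--
--     # append the input_num_bit to ans
--     for j in range(len(input_num_bit)):
--         ans.append(input_num_bit[j])
--
--     return ''.join(ans)
--
-- def bit_representation(num, is_seven=False):
--     """
--     Description: get the bit representation for the num, if is_seven is true, then the function we make
--                  sure that output is length of 7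
--     Written by: Kuah Jia Chen
--     Input: num is an integer
--     Return: the bit representation for the num
--     Time complexity (Worst case) : O(log N), where N is the num
--     Space complexity:
--         Input: O(1)
--         Aux: O(log N), where N is the num
--     """
--     ans = []
--
--     # get the bit representation of the num
--     while num > 1:
--         remainder = num % 2
--         ans.append(str(remainder))
--         num //= 2
--
--     ans.append(str(num))
--
--     # append "0" until the length of output is seven if is_seven is true
--     if is_seven:
--         while len(ans) < 7:
--             ans.append("0")
--
--     # return the ans in reverse order
--     return ans[::-1]
-- ===== SOURCE B (Python) =====
-- def _binary(n):
--     # binary string of n (str(n) itself when n <= 1)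
--     if n <= 1:
--         return str(n)
--     return _binary(n // 2) + str(n % 2)
--
-- def _prefix(L):
--     # Elias length-prefix for a code of length L, built recursively
--     if L <= 1:
--         return ''
--     c = '0' + _binary(L - 1)[1:]
--     return _prefix(len(c)) + c
--
-- def elias(input_num):
--     if input_num <= 1:
--         return str(input_num)
--     bits = _binary(input_num)
--     return _prefix(len(bits)) + bits
-- ===== Notes on version B (the rewrite author's own statement) =====
-- stated objective: alternative
-- what changed: Replaces A's iterative append-then-reverse accumulation of the Elias length prefix by a direct recursion prefix(L) = prefix(len(c)) + c over the length chain, with the binary expansion itself computed recursively (binary(n) = binary(n//2) + str(n%2)) instead of a loop pushing remainders into a list that is reversed and joined.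
import Mathlib
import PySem

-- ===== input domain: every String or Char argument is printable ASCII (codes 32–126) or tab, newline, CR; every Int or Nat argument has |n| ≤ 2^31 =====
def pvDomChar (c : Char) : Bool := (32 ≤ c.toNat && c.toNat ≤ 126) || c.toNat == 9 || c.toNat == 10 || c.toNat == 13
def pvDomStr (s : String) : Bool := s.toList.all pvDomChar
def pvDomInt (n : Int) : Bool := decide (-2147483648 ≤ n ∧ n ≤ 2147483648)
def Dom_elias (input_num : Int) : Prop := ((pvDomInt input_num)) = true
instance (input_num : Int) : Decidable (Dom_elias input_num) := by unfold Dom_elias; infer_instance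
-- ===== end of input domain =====

-- B recursively builds the Elias length prefix (prefix(L) = prefix(len(c)) + c) instead of A's
-- append-then-reverse loop; same return value on every Int, objective: alternative decomposition.

-- ===== PORT A =====
-- termination measure fact for the two halving loops (named so the decreasing proofs stay small)
theorem floordiv2_toNat_lt (n : Int) (h : 1 < n) : (PySem.Int.floordiv n 2).toNat < n.toNat := by
  rw [PySem.Int.floordiv_eq_ediv_of_pos (by omega : (0:Int) < 2)]; omega

-- bit_representation's while loop (is_seven defaults to False and elias never passes it,
-- so the dead padding branch is omitted)
def bitRepGo (num : Int) (ans : List String) : List String :=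
  if h : 1 < num then
    bitRepGo (PySem.Int.floordiv num 2) (ans ++ [PySem.Int.toStr (PySem.Int.mod num 2)])
  else ans ++ [PySem.Int.toStr num]
  termination_by num.toNat
  decreasing_by exact floordiv2_toNat_lt num h

-- bit_representation: the loop's list, reversed ('ans[::-1]' is reverse, cf. PySem.List.slice?_none_none_neg_one)
def bitRep (num : Int) : List String := (bitRepGo num []).reverse

-- elias's while loop: state is (length_of_bits, ans); the inner for loop over
-- range(len(c)-1, -1, -1) appending c[i] is the foldl.  fuel is a totality guard only:
-- the fuel = L passed by elias is never exhausted since the length chain strictly decreases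
-- (bitRep_len_le below); the 0 branch is unreachable from elias.
def eliasGo : Nat → Nat → List String → List String
  | 0, _, ans => ans
  | fuel + 1, L, ans =>
    if 1 < L then
      let c := (bitRep ((L : Int) - 1)).set 0 "0"
      eliasGo fuel c.length
        ((PySem.List.pyRange ((c.length : Int) - 1) (-1) (-1)).foldl
          (fun acc i => acc ++ [PySem.List.pyGetD c i ""]) ans)
    else ans

def elias (input_num : Int) : String :=
  let input_num_bit := bitRep input_num
  let ans := eliasGo input_num_bit.length input_num_bit.length []
  let ans := ans.reverse   -- ans[::-1]
  let ans := (PySem.List.pyRange 0 (PySem.List.len input_num_bit)).foldl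
      (fun acc j => acc ++ [PySem.List.pyGetD input_num_bit j ""]) ans
  PySem.Str.join "" ans

-- ===== PORT B =====
-- _binary, recursively (strings ported on the List Char side; String.ofList at the end)
def binAltC (n : Int) : List Char :=
  if h : n ≤ 1 then PySem.Int.toChars n
  else binAltC (PySem.Int.floordiv n 2) ++ PySem.Int.toChars (PySem.Int.mod n 2)
  termination_by n.toNat
  decreasing_by exact floordiv2_toNat_lt n (Int.not_le.mp h)

-- _prefix, recursively over the length chain.  fuel is a totality guard only: elias_alt
-- passes fuel = L and the chain of lengths strictly decreases (binAltC_len below), so the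
-- 0 branch is unreachable from elias_alt.
def prefixAltC : Nat → Nat → List Char
  | 0, _ => []
  | fuel + 1, L =>
    if L ≤ 1 then []
    else
      let c := '0' :: PySem.List.slice (binAltC ((L : Int) - 1)) (some 1) none   -- '0' + _binary(L-1)[1:]
      prefixAltC fuel c.length ++ c

def elias_alt (input_num : Int) : String :=
  if input_num ≤ 1 then PySem.Int.toStr input_num
  else
    let bits := binAltC input_num
    String.ofList (prefixAltC bits.length bits.length ++ bits)

-- ===== PRECONDITION & SPEC =====
def Spec_elias (input_num : Int) (out : String) : Prop := out = elias_alt input_num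
instance (input_num : Int) (out : String) : Decidable (Spec_elias input_num out) := by unfold Spec_elias; infer_instance

-- ===== CLAIM (what is proved, stated in full; the proofs are below) =====
def Claim_equal_elias : Prop := ∀ (input_num : Int), Dom_elias input_num → Spec_elias input_num (elias input_num)

-- ===== LEMMAS AND PROOFS =====

-- unfolding equations of bitRepGo
theorem bitRepGo_eq (num : Int) (ans : List String) (h : 1 < num) :
    bitRepGo num ans
      = bitRepGo (PySem.Int.floordiv num 2) (ans ++ [PySem.Int.toStr (PySem.Int.mod num 2)]) := by
  rw [bitRepGo, dif_pos h]

theorem bitRepGo_eq_base (num : Int) (ans : List String) (h : ¬ 1 < num) :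
    bitRepGo num ans = ans ++ [PySem.Int.toStr num] := by
  rw [bitRepGo, dif_neg h]

-- the accumulator of bitRepGo is a prefix of its result
theorem bitRepGo_acc (num : Int) (ans : List String) :
    bitRepGo num ans = ans ++ bitRepGo num [] := by
  have H : ∀ (k : Nat) (n : Int), n.toNat ≤ k → ∀ a, bitRepGo n a = a ++ bitRepGo n [] := by
    intro k
    induction k with
    | zero =>
      intro n hk a
      have h : ¬ 1 < n := by omega
      rw [bitRepGo_eq_base n a h, bitRepGo_eq_base n [] h]; simp
    | succ k ih =>
      intro n hk a
      by_cases h : 1 < n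
      · have hd : PySem.Int.floordiv n 2 = n / 2 := PySem.Int.floordiv_eq_ediv_of_pos (by omega)
        have hle : (PySem.Int.floordiv n 2).toNat ≤ k := by rw [hd]; omega
        rw [bitRepGo_eq n a h, bitRepGo_eq n [] h,
            ih (PySem.Int.floordiv n 2) hle (a ++ [PySem.Int.toStr (PySem.Int.mod n 2)]),
            ih (PySem.Int.floordiv n 2) hle ([] ++ [PySem.Int.toStr (PySem.Int.mod n 2)])]
        simp
      · rw [bitRepGo_eq_base n a h, bitRepGo_eq_base n [] h]; simp
  exact H num.toNat num le_rfl ans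

theorem bitRep_step (num : Int) (h : 1 < num) :
    bitRep num = bitRep (PySem.Int.floordiv num 2) ++ [PySem.Int.toStr (PySem.Int.mod num 2)] := by
  unfold bitRep
  rw [bitRepGo_eq num [] h, bitRepGo_acc]
  simp

theorem bitRep_base (num : Int) (h : ¬ 1 < num) : bitRep num = [PySem.Int.toStr num] := by
  unfold bitRep; rw [bitRepGo_eq_base num [] h]; simp

-- the length of the bit list is bounded by the number (the length chain strictly decreases)
theorem bitRep_len_le (num : Int) (h : 0 < num) : (bitRep num).length ≤ num.toNat := by
  have H : ∀ (k : Nat) (n : Int), 0 < n → n.toNat ≤ k → (bitRep n).length ≤ n.toNat := by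
    intro k
    induction k with
    | zero => intro n hn hk; omega
    | succ k ih =>
      intro n hn hk
      by_cases h1 : 1 < n
      · have hd : PySem.Int.floordiv n 2 = n / 2 := PySem.Int.floordiv_eq_ediv_of_pos (by omega)
        have := ih (PySem.Int.floordiv n 2) (by rw [hd]; omega) (by rw [hd]; omega)
        rw [bitRep_step n h1]
        simp only [List.length_append, List.length_cons, List.length_nil]
        rw [hd] at this ⊢
        omega
      · rw [bitRep_base n h1]; simp; omega
  exact H num.toNat num h le_rfl

-- length bounds for B's binary string
theorem binAltC_len (n : Int) (h : 0 < n) :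
    0 < (binAltC n).length ∧ (binAltC n).length ≤ n.toNat := by
  have H : ∀ (k : Nat) (m : Int), 0 < m → m.toNat ≤ k →
      0 < (binAltC m).length ∧ (binAltC m).length ≤ m.toNat := by
    intro k
    induction k with
    | zero => intro m hm hk; omega
    | succ k ih =>
      intro m hm hk
      by_cases h1 : m ≤ 1
      · have : m = 1 := by omega
        subst this
        rw [binAltC, dif_pos (by omega : (1:Int) ≤ 1)]
        simp [show PySem.Int.toChars 1 = ['1'] from by decide]
      · have hd : PySem.Int.floordiv m 2 = m / 2 := PySem.Int.floordiv_eq_ediv_of_pos (by omega)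
        have hrec := ih (PySem.Int.floordiv m 2) (by rw [hd]; omega) (by rw [hd]; omega)
        have hmod : PySem.Int.mod m 2 = m % 2 := PySem.Int.mod_eq_emod_of_pos (by omega)
        have hcases : PySem.Int.mod m 2 = 0 ∨ PySem.Int.mod m 2 = 1 := by rw [hmod]; omega
        rw [binAltC, dif_neg h1]
        have hlen : (PySem.Int.toChars (PySem.Int.mod m 2)).length = 1 := by
          rcases hcases with hc | hc <;> rw [hc] <;> decide
        simp only [List.length_append, hlen]
        rw [hd] at hrec ⊢
        omega
  exact H n.toNat n h le_rfl

theorem binAltC_ne_nil (n : Int) (h : 0 < n) : binAltC n ≠ [] := by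
  have := (binAltC_len n h).1
  intro hnil; rw [hnil] at this; simp at this

-- unfolding equations of eliasGo and prefixAltC
theorem eliasGo_succ (fuel L : Nat) (ans : List String) :
    eliasGo (fuel + 1) L ans
      = if 1 < L then
          eliasGo fuel ((bitRep ((L : Int) - 1)).set 0 "0").length
            ((PySem.List.pyRange (((((bitRep ((L : Int) - 1)).set 0 "0").length : Int)) - 1) (-1) (-1)).foldl
              (fun acc i => acc ++ [PySem.List.pyGetD ((bitRep ((L : Int) - 1)).set 0 "0") i ""]) ans)
        else ans := rfl

theorem prefixAltC_succ (fuel L : Nat) (h : ¬ L ≤ 1) :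
    prefixAltC (fuel + 1) L
      = prefixAltC fuel ('0' :: PySem.List.slice (binAltC ((L : Int) - 1)) (some 1) none).length
          ++ ('0' :: PySem.List.slice (binAltC ((L : Int) - 1)) (some 1) none) := by
  rw [show prefixAltC (fuel + 1) L
      = if L ≤ 1 then []
        else prefixAltC fuel ('0' :: PySem.List.slice (binAltC ((L : Int) - 1)) (some 1) none).length
          ++ ('0' :: PySem.List.slice (binAltC ((L : Int) - 1)) (some 1) none) from rfl, if_neg h]

theorem prefixAltC_base (fuel L : Nat) (h : L ≤ 1) : prefixAltC fuel L = [] := by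
  cases fuel with
  | zero => rfl
  | succ f =>
    rw [show prefixAltC (f + 1) L
        = if L ≤ 1 then []
          else prefixAltC f ('0' :: PySem.List.slice (binAltC ((L : Int) - 1)) (some 1) none).length
            ++ ('0' :: PySem.List.slice (binAltC ((L : Int) - 1)) (some 1) none) from rfl, if_pos h]

-- ''.join is list flatten
theorem join_nil_flatten : ∀ (ls : List (List Char)), PySem.Chars.join [] ls = ls.flatten
  | [] => PySem.Chars.join_nil []
  | [p] => by rw [PySem.Chars.join_singleton]; simp
  | p :: q :: rest => by
      rw [PySem.Chars.join_cons_cons]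
      simp [join_nil_flatten (q :: rest)]

-- flattening singletons is the identity (''.join through Chars.join_nil_singletons)
theorem flatten_sing (cs : List Char) : (cs.map (fun c => [c])).flatten = cs := by
  rw [← join_nil_flatten]
  exact PySem.Chars.join_nil_singletons cs

-- A's digit list is B's char string, digit by digit
theorem bitRep_binAlt (n : Int) (h : 0 < n) :
    (bitRep n).map String.toList = (binAltC n).map (fun c => [c]) := by
  have H : ∀ (k : Nat) (m : Int), 0 < m → m.toNat ≤ k →
      (bitRep m).map String.toList = (binAltC m).map (fun c => [c]) := by
    intro k
    induction k with
    | zero => intro m hm hk; omega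
    | succ k ih =>
      intro m hm hk
      by_cases h1 : 1 < m
      · have hd : PySem.Int.floordiv m 2 = m / 2 := PySem.Int.floordiv_eq_ediv_of_pos (by omega)
        have hrec := ih (PySem.Int.floordiv m 2) (by rw [hd]; omega) (by rw [hd]; omega)
        have hmod : PySem.Int.mod m 2 = m % 2 := PySem.Int.mod_eq_emod_of_pos (by omega)
        have hsing : (PySem.Int.toStr (PySem.Int.mod m 2)).toList
            = (PySem.Int.toChars (PySem.Int.mod m 2)) := PySem.Int.toList_toStr _
        have hone : ∃ c, PySem.Int.toChars (PySem.Int.mod m 2) = [c] := by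
          have hcases : PySem.Int.mod m 2 = 0 ∨ PySem.Int.mod m 2 = 1 := by rw [hmod]; omega
          rcases hcases with hc | hc <;> rw [hc]
          · exact ⟨'0', by decide⟩
          · exact ⟨'1', by decide⟩
        obtain ⟨c, hc⟩ := hone
        rw [bitRep_step m h1, binAltC, dif_neg (by omega : ¬ m ≤ 1)]
        simp only [List.map_append, hrec, List.map_cons, List.map_nil, hsing, hc]
      · have : m = 1 := by omega
        subst this
        rw [bitRep_base 1 (by omega), binAltC, dif_pos (by omega : (1:Int) ≤ 1)]
        simp only [List.map_cons, List.map_nil, PySem.Int.toList_toStr]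
        decide
  exact H n.toNat n h le_rfl

-- the reversed-index for loop appends c reversed
theorem rev_fold_eq (c : List String) (ans : List String) :
    (PySem.List.pyRange ((c.length : Int) - 1) (-1) (-1)).foldl
      (fun acc i => acc ++ [PySem.List.pyGetD c i ""]) ans = ans ++ c.reverse := by
  rw [PySem.List.pyRange_neg_one_eq_reverse]
  have h1 : ((-1 : Int) + 1) = 0 := by ring
  have h2 : ((c.length : Int) - 1 + 1) = PySem.List.len c := by simp [PySem.List.len]
  rw [h1, h2, List.foldl_reverse]
  have h3 : ∀ (xs : List Int) (a : List String),
      xs.foldr (fun i acc => acc ++ [PySem.List.pyGetD c i ""]) a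
        = a ++ (xs.map (fun i => PySem.List.pyGetD c i "")).reverse := by
    intro xs
    induction xs with
    | nil => intro a; simp
    | cons x t iht => intro a; simp [iht]
  rw [h3, PySem.List.map_pyGetD_pyRange_zero]

-- the accumulator of eliasGo is a prefix of its result
theorem eliasGo_acc (fuel L : Nat) (ans : List String) :
    eliasGo fuel L ans = ans ++ eliasGo fuel L [] := by
  induction fuel generalizing L ans with
  | zero => simp [eliasGo]
  | succ f ih =>
    by_cases h : 1 < L
    · set cA := (bitRep ((L : Int) - 1)).set 0 "0" with hcA
      rw [eliasGo_succ f L ans, eliasGo_succ f L [], if_pos h, if_pos h,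
          rev_fold_eq, rev_fold_eq, ← hcA, List.nil_append,
          ih cA.length (ans ++ cA.reverse), ih cA.length cA.reverse]
      simp
    · rw [eliasGo_succ f L ans, eliasGo_succ f L [], if_neg h, if_neg h]; simp

-- the while loop computes exactly B's recursive prefix (read back through the final reverse);
-- any sufficient fuel on either side gives the same value
theorem go_prefix (fuel : Nat) :
    ∀ (L : Nat), L ≤ fuel → ∀ (g : Nat), L ≤ g →
      ((eliasGo fuel L []).reverse.map String.toList).flatten = prefixAltC g L := by
  induction fuel with
  | zero =>
    intro L hL g hg
    have h0 : L = 0 := by omega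
    subst h0
    rw [prefixAltC_base g 0 (by omega)]
    simp [eliasGo]
  | succ f ih =>
    intro L hL g hg
    by_cases h : 1 < L
    · obtain ⟨g', rfl⟩ : ∃ g'', g = g'' + 1 := ⟨g - 1, by omega⟩
      have hm : (0:Int) < (L : Int) - 1 := by omega
      have hmap := bitRep_binAlt ((L : Int) - 1) hm
      obtain ⟨a, t, hbt⟩ : ∃ a t, binAltC ((L : Int) - 1) = a :: t := by
        cases hb : binAltC ((L : Int) - 1) with
        | nil => exact absurd hb (binAltC_ne_nil _ hm)
        | cons a t => exact ⟨a, t, rfl⟩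
      have hset : ((bitRep ((L : Int) - 1)).set 0 "0").map String.toList
          = ('0' :: t).map (fun c => [c]) := by
        rw [List.map_set, hmap, hbt]
        simp only [List.map_cons, List.set_cons_zero]
        have : ("0" : String).toList = ['0'] := by decide
        rw [this]
      have hlt : ((bitRep ((L : Int) - 1)).set 0 "0").length < L := by
        simp only [List.length_set]
        have := bitRep_len_le ((L : Int) - 1) hm
        omega
      have hlen : ((bitRep ((L : Int) - 1)).set 0 "0").length = ('0' :: t).length := by
        have := congrArg List.length hset
        simpa using this
      rw [eliasGo_succ f L [], if_pos h, rev_fold_eq, List.nil_append, eliasGo_acc]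
      simp only [List.reverse_append, List.reverse_reverse, List.map_append, List.flatten_append]
      rw [ih _ (by omega) g' (by omega),
          prefixAltC_succ g' L (by omega), PySem.List.slice_from_one, hbt,
          List.tail_cons, hset, hlen]
      simp [flatten_sing]
    · rw [eliasGo_succ f L [], if_neg h, prefixAltC_base g L (by omega)]
      simp

-- the trailing for loop appends the bit list itself
theorem final_fold_eq (bits ans : List String) :
    (PySem.List.pyRange 0 (PySem.List.len bits)).foldl
      (fun acc j => acc ++ [PySem.List.pyGetD bits j ""]) ans = ans ++ bits := by
  rw [PySem.List.foldl_append_singleton_eq_map, PySem.List.map_pyGetD_pyRange_zero]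

-- ===== VERDICT (by name: the statement is the Claim_ definition above) =====
theorem elias_spec : Claim_equal_elias := by
  unfold Claim_equal_elias
  intro n _
  unfold Spec_elias
  rw [← String.toList_inj]
  have hA : elias n = PySem.Str.join ""
      ((PySem.List.pyRange 0 (PySem.List.len (bitRep n))).foldl
        (fun acc j => acc ++ [PySem.List.pyGetD (bitRep n) j ""])
        ((eliasGo (bitRep n).length (bitRep n).length []).reverse)) := rfl
  rw [hA, final_fold_eq, PySem.Str.toList_join,
      show ("" : String).toList = [] from rfl, join_nil_flatten]
  simp only [List.map_append, List.flatten_append]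
  by_cases h : n ≤ 1
  · unfold elias_alt
    rw [if_pos h, bitRep_base n (by omega)]
    simp only [List.length_cons, List.length_nil]
    rw [go_prefix 1 1 le_rfl 1 le_rfl, prefixAltC_base 1 1 (by omega)]
    simp [PySem.Int.toList_toStr]
  · unfold elias_alt
    rw [if_neg h]
    simp only
    have hofList : (String.ofList (prefixAltC (binAltC n).length (binAltC n).length ++ binAltC n)).toList
        = prefixAltC (binAltC n).length (binAltC n).length ++ binAltC n := by simp
    rw [hofList]
    have hmap := bitRep_binAlt n (by omega)
    have hlen : (bitRep n).length = (binAltC n).length := by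
      have := congrArg List.length hmap
      simpa using this
    rw [go_prefix (bitRep n).length (bitRep n).length le_rfl (binAltC n).length (le_of_eq hlen),
        hlen, hmap, flatten_sing]
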